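-- pv_equiv track=rewrite | github.com/LUDzik77/ST-Tournament | StarCraftTournament/ST_model.py | count_income
-- ===== SOURCE A (Python) =====
-- def count_income(workers):
--     workers_on_gas = (workers)//3
--
--     if workers_on_gas>4: workers_on_gas=4
--     workers_on_minerals = workers - workers_on_gas
--
--     minerals_full = (8,3)
--     minerals_limited = (12,2)
--     minerals_limited2 = (36,1)
--     minerals_gain=0
--     for worker in range(workers_on_minerals):
--             if worker <= minerals_full[0]: minerals_gain += minerals_full[1]
--             elif worker <= minerals_limited[0]: minerals_gain += minerals_limited[1]
--             elif worker <= minerals_limited2[0]: minerals_gain += minerals_limited2[1]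
--
--     gas_full = (2,5)
--     gas_limited = (3,4)
--     gas_limited2 = (4,3)
--     gas_depeated = 1   #to be implemented
--     gas_gain = 0
--
--     for worker in range(workers_on_gas):
--         if worker <= gas_full[0]: gas_gain += gas_full[1]
--         elif worker <= gas_limited[0]: gas_gain += gas_limited[1]
--         elif worker <= gas_limited2[0]: gas_gain += gass_limited2[1]
--     return([minerals_gain, gas_gain])
-- ===== SOURCE B (Python) =====
-- def count_income(workers):
--     def clamp(x, hi):
--         return 0 if x < 0 else (hi if x > hi else x)
--     gas_workers = min(workers // 3, 4)
--     mineral_workers = workers - gas_workers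
--     minerals = 3 * clamp(mineral_workers, 9) + 2 * clamp(mineral_workers - 9, 4) + clamp(mineral_workers - 13, 24)
--     gas = 5 * clamp(gas_workers, 3) + 4 * clamp(gas_workers - 3, 1)
--     return [minerals, gas]
-- ===== Notes on version B (the rewrite author's own statement) =====
-- stated objective: faster
-- what changed: Replaced the two per-worker accumulation loops by a closed-form piecewise sum: each income tier contributes rate x (clamped worker count in that tier), computed in O(1).
import Mathlib
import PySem

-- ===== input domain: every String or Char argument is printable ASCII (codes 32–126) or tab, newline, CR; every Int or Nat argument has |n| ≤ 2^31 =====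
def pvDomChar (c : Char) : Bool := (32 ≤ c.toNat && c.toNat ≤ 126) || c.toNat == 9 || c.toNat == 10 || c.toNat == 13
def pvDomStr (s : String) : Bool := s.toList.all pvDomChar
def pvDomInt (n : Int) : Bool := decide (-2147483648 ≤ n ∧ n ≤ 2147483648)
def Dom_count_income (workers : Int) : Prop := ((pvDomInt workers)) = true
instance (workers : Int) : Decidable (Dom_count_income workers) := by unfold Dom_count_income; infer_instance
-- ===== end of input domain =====

-- B replaces A's two per-worker loops by a closed-form piecewise (clamped) tier sum; objective: faster (O(1) vs O(n)).

-- ===== PORT A =====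
def count_income (workers : Int) : List Int :=
  let workers_on_gas := PySem.Int.floordiv workers 3
  let workers_on_gas := if workers_on_gas > 4 then 4 else workers_on_gas
  let workers_on_minerals := workers - workers_on_gas
  let minerals_gain := (PySem.List.pyRange 0 workers_on_minerals 1).foldl
    (fun acc worker =>
      if worker ≤ 8 then acc + 3
      else if worker ≤ 12 then acc + 2
      else if worker ≤ 36 then acc + 1
      else acc) 0
  -- the last gas branch references an undefined name in Python but is unreachable
  -- (worker < workers_on_gas ≤ 4 and worker ≤ 3 already covers it); ported with the intended value 3
  let gas_gain := (PySem.List.pyRange 0 workers_on_gas 1).foldl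
    (fun acc worker =>
      if worker ≤ 2 then acc + 5
      else if worker ≤ 3 then acc + 4
      else if worker ≤ 4 then acc + 3
      else acc) 0
  [minerals_gain, gas_gain]

-- ===== PORT B =====
def pvClamp (x hi : Int) : Int := if x < 0 then 0 else if x > hi then hi else x

def count_income_alt (workers : Int) : List Int :=
  let gasWorkers := min (PySem.Int.floordiv workers 3) 4
  let mineralWorkers := workers - gasWorkers
  let minerals := 3 * pvClamp mineralWorkers 9 + 2 * pvClamp (mineralWorkers - 9) 4
    + pvClamp (mineralWorkers - 13) 24
  let gas := 5 * pvClamp gasWorkers 3 + 4 * pvClamp (gasWorkers - 3) 1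
  [minerals, gas]

-- ===== PRECONDITION & SPEC =====
def Spec_count_income (workers : Int) (out : List Int) : Prop := out = count_income_alt workers
instance (workers : Int) (out : List Int) : Decidable (Spec_count_income workers out) := by unfold Spec_count_income; infer_instance

-- ===== CLAIM (what is proved, stated in full; the proofs are below) =====
def Claim_equal_count_income : Prop := ∀ (workers : Int), Dom_count_income workers → Spec_count_income workers (count_income workers)

-- ===== LEMMAS AND PROOFS =====

def pvMinStep (acc worker : Int) : Int :=
  if worker ≤ 8 then acc + 3
  else if worker ≤ 12 then acc + 2
  else if worker ≤ 36 then acc + 1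
  else acc

def pvGasStep (acc worker : Int) : Int :=
  if worker ≤ 2 then acc + 5
  else if worker ≤ 3 then acc + 4
  else if worker ≤ 4 then acc + 3
  else acc

lemma pvClamp_succ (x hi : Int) (hhi : 0 ≤ hi) :
    pvClamp (x + 1) hi = pvClamp x hi + (if 0 ≤ x ∧ x < hi then 1 else 0) := by
  simp only [pvClamp]
  split_ifs <;> omega

lemma pvMinFold_nat (n : Nat) :
    (PySem.List.pyRange 0 (n : Int) 1).foldl pvMinStep 0 =
      3 * pvClamp n 9 + 2 * pvClamp ((n : Int) - 9) 4 + pvClamp ((n : Int) - 13) 24 := by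
  induction n with
  | zero => simp [PySem.List.pyRange_one_eq_nil, pvClamp]
  | succ n ih =>
      have h : ((n + 1 : Nat) : Int) = (n : Int) + 1 := by push_cast; ring
      rw [h, PySem.List.pyRange_one_succ_right (Int.natCast_nonneg n), List.foldl_append,
        List.foldl_cons, List.foldl_nil, ih]
      have e2 : ((n : Int)) + 1 - 9 = ((n : Int) - 9) + 1 := by ring
      have e3 : ((n : Int)) + 1 - 13 = ((n : Int) - 13) + 1 := by ring
      rw [e2, e3, pvClamp_succ _ 9 (by norm_num), pvClamp_succ _ 4 (by norm_num),
        pvClamp_succ _ 24 (by norm_num)]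
      simp only [pvMinStep]
      split_ifs <;> omega

lemma pvGasFold_eq (g : Int) (hg : g ≤ 4) :
    (PySem.List.pyRange 0 g 1).foldl pvGasStep 0 =
      5 * pvClamp g 3 + 4 * pvClamp (g - 3) 1 := by
  by_cases h : g ≤ 0
  · rw [PySem.List.pyRange_one_eq_nil h]
    simp only [List.foldl_nil, pvClamp]
    split_ifs <;> omega
  · have h' : 0 < g := by omega
    interval_cases g <;> decide

theorem pv_count_income_eq (workers : Int) :
    count_income workers = count_income_alt workers := by
  unfold count_income count_income_alt
  have hmin : (fun acc worker => if worker ≤ 8 then acc + 3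
      else if worker ≤ 12 then acc + 2
      else if worker ≤ 36 then acc + 1
      else acc) = pvMinStep := rfl
  have hgas : (fun acc worker => if worker ≤ 2 then acc + 5
      else if worker ≤ 3 then acc + 4
      else if worker ≤ 4 then acc + 3
      else acc) = pvGasStep := rfl
  simp only [hmin, hgas]
  set q := PySem.Int.floordiv workers 3 with hq
  have hgdef : (if q > 4 then 4 else q) = min q 4 := by
    by_cases h : q > 4 <;> simp [h] <;> omega
  rw [hgdef]
  have hm : workers - min q 4 = (workers - min q 4) := rfl
  by_cases hpos : 0 ≤ workers - min q 4
  · have := pvMinFold_nat (workers - min q 4).toNat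
    rw [Int.toNat_of_nonneg hpos] at this
    rw [this, pvGasFold_eq (min q 4) (min_le_right _ _)]
  · rw [PySem.List.pyRange_one_eq_nil (by omega),
        pvGasFold_eq (min q 4) (min_le_right _ _)]
    simp only [List.foldl_nil]
    have : pvClamp (workers - min q 4) 9 = 0 ∧ pvClamp (workers - min q 4 - 9) 4 = 0 ∧
        pvClamp (workers - min q 4 - 13) 24 = 0 := by
      unfold pvClamp; split_ifs <;> omega
    rw [this.1, this.2.1, this.2.2]
    norm_num

-- ===== VERDICT (by name: the statement is the Claim_ definition above) =====
theorem count_income_spec : Claim_equal_count_income := by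
  intro workers _
  unfold Spec_count_income
  exact pv_count_income_eq workers
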